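-- pv_equiv track=rewrite | github.com/ims510/pos-tagger | scripts/visualisation.py | surligner_texte
-- ===== SOURCE A (Python) =====
-- def surligner_texte(content):
--     highlighted_content = ""
--     i = 0
--     while i < len(content):
--         if content[i] == '{':
--             highlighted_content += '<span style="background-color: lightblue;">{'
--             i += 1
--             while i < len(content) and content[i] != '}':
--                 highlighted_content += content[i]
--                 i += 1
--             highlighted_content += '}'
--             if i < len(content) and content[i] == '}':
--                 i += 1
--             highlighted_content += '</span>'
--         elif content[i] == '<':
--             highlighted_content += '<span style="background-color: lightgreen;"><'
--             i += 1
--             while i < len(content) and content[i] != '>':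
--                 highlighted_content += content[i]
--                 i += 1
--             highlighted_content += '>'
--             if i < len(content) and content[i] == '>':
--                 i += 1
--             highlighted_content += '</span>'
--         elif content[i] == '|':
--             highlighted_content += '<span style="font-weight: bold; color: black; background-color: yellow;">|</span>'
--             i += 1
--         elif content[i] == '~':
--             highlighted_content += '<span style="color: red; font-weight: bold;">~</span>'
--             i += 1
--         else:
--             highlighted_content += content[i]
--             i += 1
--     return highlighted_content
-- ===== SOURCE B (Python) =====
-- def surligner_texte(content):
--     parts = []
--     i = 0
--     n = len(content)
--     while i < n:
--         c = content[i]
--         if c == '{':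
--             j = content.find('}', i + 1)
--             if j == -1:
--                 inner, i = content[i+1:], n
--             else:
--                 inner, i = content[i+1:j], j + 1
--             parts.append('<span style="background-color: lightblue;">{' + inner + '}</span>')
--         elif c == '<':
--             j = content.find('>', i + 1)
--             if j == -1:
--                 inner, i = content[i+1:], n
--             else:
--                 inner, i = content[i+1:j], j + 1
--             parts.append('<span style="background-color: lightgreen;"><' + inner + '></span>')
--         elif c == '|':
--             parts.append('<span style="font-weight: bold; color: black; background-color: yellow;">|</span>')
--             i += 1
--         elif c == '~':
--             parts.append('<span style="color: red; font-weight: bold;">~</span>')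
--             i += 1
--         else:
--             j = i + 1
--             while j < n and content[j] not in '{<|~':
--                 j += 1
--             parts.append(content[i:j])
--             i = j
--     return ''.join(parts)
-- ===== Notes on version B (the rewrite author's own statement) =====
-- stated objective: faster
-- what changed: A copies one character per Python-level iteration into a growing string with a nested char-copy loop for each block; B tokenizes the text, grabbing each delimited block with str.find+slice and each plain run in one C-level piece, and joins the collected pieces once at the end.
import Mathlib
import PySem

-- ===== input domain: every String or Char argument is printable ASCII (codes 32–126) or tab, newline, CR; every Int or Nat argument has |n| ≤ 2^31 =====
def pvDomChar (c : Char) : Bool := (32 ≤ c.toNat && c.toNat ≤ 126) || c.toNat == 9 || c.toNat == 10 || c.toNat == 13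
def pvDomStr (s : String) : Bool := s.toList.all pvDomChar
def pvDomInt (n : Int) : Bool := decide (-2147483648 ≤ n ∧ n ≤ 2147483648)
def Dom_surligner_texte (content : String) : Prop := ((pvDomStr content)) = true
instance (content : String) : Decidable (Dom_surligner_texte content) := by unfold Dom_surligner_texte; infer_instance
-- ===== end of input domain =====

-- B replaces A's char-by-char copying loop by a tokenizer that grabs whole blocks and plain runs
-- with find/slices and joins the pieces once (objective: faster, measured constant-factor).

-- shared literal chunks (the HTML span strings both Pythons write)
def pvBlue : List Char := "<span style=\"background-color: lightblue;\">{".toList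
def pvGreen : List Char := "<span style=\"background-color: lightgreen;\"><".toList
def pvClose : List Char := "</span>".toList
def pvPipe : List Char := "<span style=\"font-weight: bold; color: black; background-color: yellow;\">|</span>".toList
def pvTilde : List Char := "<span style=\"color: red; font-weight: bold;\">~</span>".toList

-- ===== PORT A =====
-- A's inner `while` copying characters up to the closing delimiter, one at a time
def aInner (stop : Char) (acc rest : List Char) : List Char × List Char :=
  match rest with
  | [] => (acc, [])
  | c :: t => if c = stop then (acc, c :: t) else aInner stop (acc ++ [c]) t

theorem aInner_len (stop : Char) (acc rest : List Char) :
    (aInner stop acc rest).2.length ≤ rest.length := by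
  induction rest generalizing acc with
  | nil => simp [aInner]
  | cons c t ih =>
    simp only [aInner]
    split
    · simp
    · exact le_trans (ih _) (Nat.le_succ _)

-- A's outer `while i < len(content)` loop, accumulator = the string built so far
def aLoop (acc rest : List Char) : List Char :=
  match rest with
  | [] => acc
  | c :: t =>
    if c = '{' then
      let p := aInner '}' (acc ++ pvBlue) t
      let acc2 := p.1 ++ ['}']
      let rest2 := match p.2 with
        | d :: t2 => if d = '}' then t2 else d :: t2
        | [] => []
      aLoop (acc2 ++ pvClose) rest2
    else if c = '<' then
      let p := aInner '>' (acc ++ pvGreen) t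
      let acc2 := p.1 ++ ['>']
      let rest2 := match p.2 with
        | d :: t2 => if d = '>' then t2 else d :: t2
        | [] => []
      aLoop (acc2 ++ pvClose) rest2
    else if c = '|' then aLoop (acc ++ pvPipe) t
    else if c = '~' then aLoop (acc ++ pvTilde) t
    else aLoop (acc ++ [c]) t
termination_by rest.length
decreasing_by
  · have h := aInner_len '}' (acc ++ pvBlue) t
    split <;> first | (split <;> simp_all <;> omega) | simp_all
  · have h := aInner_len '>' (acc ++ pvGreen) t
    split <;> first | (split <;> simp_all <;> omega) | simp_all
  · simp
  · simp
  · simp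

def surligner_texte (content : String) : String :=
  String.ofList (aLoop [] content.toList)

-- ===== PORT B =====
def bSpecial (c : Char) : Bool := c = '{' || c = '<' || c = '|' || c = '~'

-- B's tokenizer: each step appends one whole piece (a delimited block or a run of plain
-- characters) to `parts`; Source B's content.find / slices are takeWhile / dropWhile on the rest
def bLoop (parts : List (List Char)) (rest : List Char) : List (List Char) :=
  match rest with
  | [] => parts
  | c :: t =>
    if c = '{' then
      bLoop (parts ++ [pvBlue ++ t.takeWhile (fun d => !(d == '}')) ++ '}' :: pvClose])
        ((t.dropWhile (fun d => !(d == '}'))).drop 1)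
    else if c = '<' then
      bLoop (parts ++ [pvGreen ++ t.takeWhile (fun d => !(d == '>')) ++ '>' :: pvClose])
        ((t.dropWhile (fun d => !(d == '>'))).drop 1)
    else if c = '|' then bLoop (parts ++ [pvPipe]) t
    else if c = '~' then bLoop (parts ++ [pvTilde]) t
    else
      bLoop (parts ++ [(c :: t).takeWhile (fun d => !bSpecial d)])
        ((c :: t).dropWhile (fun d => !bSpecial d))
termination_by rest.length
decreasing_by
  · have := (List.dropWhile_sublist (l := t) (p := fun d => !(d == '}'))).length_le
    simp only [List.length_drop, List.length_cons]; omega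
  · have := (List.dropWhile_sublist (l := t) (p := fun d => !(d == '>'))).length_le
    simp only [List.length_drop, List.length_cons]; omega
  · simp
  · simp
  · have hc : bSpecial c = false := by simp_all [bSpecial]
    have := (List.dropWhile_sublist (l := t) (p := fun d => !bSpecial d)).length_le
    simp [hc]; omega

def surligner_texte_alt (content : String) : String :=
  String.ofList (bLoop [] content.toList).flatten

-- ===== PRECONDITION & SPEC =====
def Spec_surligner_texte (content : String) (out : String) : Prop := out = surligner_texte_alt content
instance (content : String) (out : String) : Decidable (Spec_surligner_texte content out) := by unfold Spec_surligner_texte; infer_instance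

-- ===== CLAIM (what is proved, stated in full; the proofs are below) =====
def Claim_equal_surligner_texte : Prop := ∀ (content : String), Dom_surligner_texte content → Spec_surligner_texte content (surligner_texte content)

-- ===== LEMMAS AND PROOFS =====
theorem aInner_spec (stop : Char) (acc rest : List Char) :
    aInner stop acc rest =
      (acc ++ rest.takeWhile (fun d => !(d == stop)), rest.dropWhile (fun d => !(d == stop))) := by
  induction rest generalizing acc with
  | nil => simp [aInner]
  | cons c t ih =>
    by_cases h : c = stop
    · simp [aInner, h]
    · simp [aInner, h, ih]

-- the leftover text after A's inner loop, with the closing delimiter consumed if present,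
-- is exactly `drop 1` of the dropWhile (the head of a nonempty dropWhile is the stop char)
theorem rest2_eq (stop : Char) (t : List Char) :
    (match List.dropWhile (fun d => !(d == stop)) t with
      | d :: t2 => if d = stop then t2 else d :: t2
      | [] => ([] : List Char)) = (List.dropWhile (fun d => !(d == stop)) t).drop 1 := by
  cases h : List.dropWhile (fun d => !(d == stop)) t with
  | nil => simp
  | cons d t2 =>
    have h2 := List.head?_dropWhile_not (fun d => !(d == stop)) t
    rw [h] at h2
    simp at h2
    simp [h2]

-- one-step unfoldings of aLoop, one per branch of A's dispatch
theorem aLoop_eq_brace (acc t) :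
    aLoop acc ('{' :: t) =
      aLoop (acc ++ pvBlue ++ t.takeWhile (fun d => !(d == '}')) ++ ['}'] ++ pvClose)
        ((t.dropWhile (fun d => !(d == '}'))).drop 1) := by
  rw [aLoop]
  simp only [aInner_spec, reduceIte, rest2_eq]

theorem aLoop_eq_angle (acc t) :
    aLoop acc ('<' :: t) =
      aLoop (acc ++ pvGreen ++ t.takeWhile (fun d => !(d == '>')) ++ ['>'] ++ pvClose)
        ((t.dropWhile (fun d => !(d == '>'))).drop 1) := by
  rw [aLoop, if_neg (by decide)]
  simp only [aInner_spec, reduceIte, rest2_eq]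

theorem aLoop_eq_pipe (acc t) : aLoop acc ('|' :: t) = aLoop (acc ++ pvPipe) t := by
  rw [aLoop, if_neg (by decide), if_neg (by decide), if_pos rfl]

theorem aLoop_eq_tilde (acc t) : aLoop acc ('~' :: t) = aLoop (acc ++ pvTilde) t := by
  rw [aLoop, if_neg (by decide), if_neg (by decide), if_neg (by decide), if_pos rfl]

theorem aLoop_eq_plain (acc c t) (h1 : ¬ c = '{') (h2 : ¬ c = '<') (h3 : ¬ c = '|')
    (h4 : ¬ c = '~') : aLoop acc (c :: t) = aLoop (acc ++ [c]) t := by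
  rw [aLoop]; simp only [h1, h2, h3, h4, if_false]

-- A's accumulator is only ever appended to
theorem aLoop_append (n : Nat) : ∀ rest : List Char, rest.length ≤ n →
    ∀ acc₁ acc₂ : List Char, aLoop (acc₁ ++ acc₂) rest = acc₁ ++ aLoop acc₂ rest := by
  induction n with
  | zero =>
    intro rest h acc₁ acc₂
    have : rest = [] := List.length_eq_zero_iff.mp (Nat.le_zero.mp h)
    simp [this, aLoop]
  | succ n ih =>
    intro rest h acc₁ acc₂
    match rest with
    | [] => simp [aLoop]
    | c :: t =>
      have ht : t.length ≤ n := by simpa using h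
      by_cases h1 : c = '{'
      · subst h1
        rw [aLoop_eq_brace, aLoop_eq_brace]
        rw [show ∀ w x y z, acc₁ ++ acc₂ ++ w ++ x ++ y ++ z = acc₁ ++ (acc₂ ++ w ++ x ++ y ++ z)
          by intros; simp]
        exact ih _ (le_trans (by
          have := (List.dropWhile_sublist (l := t) (p := fun d => !(d == '}'))).length_le
          simp only [List.length_drop]; omega) ht) _ _
      by_cases h2 : c = '<'
      · subst h2
        rw [aLoop_eq_angle, aLoop_eq_angle]
        rw [show ∀ w x y z, acc₁ ++ acc₂ ++ w ++ x ++ y ++ z = acc₁ ++ (acc₂ ++ w ++ x ++ y ++ z)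
          by intros; simp]
        exact ih _ (le_trans (by
          have := (List.dropWhile_sublist (l := t) (p := fun d => !(d == '>'))).length_le
          simp only [List.length_drop]; omega) ht) _ _
      by_cases h3 : c = '|'
      · subst h3
        rw [aLoop_eq_pipe, aLoop_eq_pipe, List.append_assoc]
        exact ih _ ht _ _
      by_cases h4 : c = '~'
      · subst h4
        rw [aLoop_eq_tilde, aLoop_eq_tilde, List.append_assoc]
        exact ih _ ht _ _
      · rw [aLoop_eq_plain _ _ _ h1 h2 h3 h4, aLoop_eq_plain _ _ _ h1 h2 h3 h4,
          List.append_assoc]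
        exact ih _ ht _ _

-- B's parts list is only ever appended to
theorem bLoop_append (n : Nat) : ∀ rest : List Char, rest.length ≤ n →
    ∀ p₁ p₂ : List (List Char), bLoop (p₁ ++ p₂) rest = p₁ ++ bLoop p₂ rest := by
  induction n with
  | zero =>
    intro rest h p₁ p₂
    have : rest = [] := List.length_eq_zero_iff.mp (Nat.le_zero.mp h)
    simp [this, bLoop]
  | succ n ih =>
    intro rest h p₁ p₂
    match rest with
    | [] => simp [bLoop]
    | c :: t =>
      have ht : t.length ≤ n := by simpa using h
      by_cases h1 : c = '{'
      · subst h1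
        rw [bLoop, bLoop]
        simp only [if_true, List.append_assoc]
        exact ih _ (le_trans (by
          have := (List.dropWhile_sublist (l := t) (p := fun d => !(d == '}'))).length_le
          simp only [List.length_drop]; omega) ht) _ _
      by_cases h2 : c = '<'
      · subst h2
        rw [bLoop, bLoop]
        simp only [show (('<':Char) = '{') = False by simp, if_false, List.append_assoc]
        exact ih _ (le_trans (by
          have := (List.dropWhile_sublist (l := t) (p := fun d => !(d == '>'))).length_le
          simp only [List.length_drop]; omega) ht) _ _
      by_cases h3 : c = '|'
      · subst h3
        rw [bLoop, bLoop]
        simp only [show (('|':Char) = '{') = False by simp, show (('|':Char) = '<') = False by simp,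
          if_false, List.append_assoc]
        exact ih _ ht _ _
      by_cases h4 : c = '~'
      · subst h4
        rw [bLoop, bLoop]
        simp only [show (('~':Char) = '{') = False by simp, show (('~':Char) = '<') = False by simp,
          show (('~':Char) = '|') = False by simp, if_false, List.append_assoc]
        exact ih _ ht _ _
      · have hc : bSpecial c = false := by simp [bSpecial, h1, h2, h3, h4]
        rw [bLoop, bLoop]
        simp only [h1, h2, h3, h4, if_false, List.append_assoc]
        exact ih _ (by
          have := (List.dropWhile_sublist (l := t) (p := fun d => !bSpecial d)).length_le
          simp [hc]; omega) _ _

theorem bLoop_one (rest : List Char) (chunk : List Char) :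
    bLoop [chunk] rest = chunk :: bLoop [] rest := by
  simpa using bLoop_append rest.length rest le_rfl [chunk] []

-- splitting off the maximal plain run does not change B's output
theorem run_split (t : List Char) :
    (bLoop [] t).flatten =
      t.takeWhile (fun d => !bSpecial d) ++
        (bLoop [] (t.dropWhile (fun d => !bSpecial d))).flatten := by
  cases t with
  | nil => simp [bLoop]
  | cons d t' =>
    by_cases hd : bSpecial d
    · have h1 : List.takeWhile (fun d => !bSpecial d) (d :: t') = [] := by
        simp [hd]
      have h2 : List.dropWhile (fun d => !bSpecial d) (d :: t') = d :: t' := by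
        simp [hd]
      rw [h1, h2]; simp
    · have h1 : ¬ d = '{' := by intro h; exact hd (by simp [bSpecial, h])
      have h2 : ¬ d = '<' := by intro h; exact hd (by simp [bSpecial, h])
      have h3 : ¬ d = '|' := by intro h; exact hd (by simp [bSpecial, h])
      have h4 : ¬ d = '~' := by intro h; exact hd (by simp [bSpecial, h])
      rw [bLoop]
      simp only [h1, h2, h3, h4, if_false, List.nil_append]
      rw [bLoop_one]
      simp

theorem main_eq (n : Nat) : ∀ rest : List Char, rest.length ≤ n →
    aLoop [] rest = (bLoop [] rest).flatten := by
  induction n with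
  | zero =>
    intro rest h
    have : rest = [] := List.length_eq_zero_iff.mp (Nat.le_zero.mp h)
    simp [this, aLoop, bLoop]
  | succ n ih =>
    intro rest h
    match rest with
    | [] => simp [aLoop, bLoop]
    | c :: t =>
      have ht : t.length ≤ n := by simpa using h
      by_cases h1 : c = '{'
      · subst h1
        have hr : ((List.dropWhile (fun d => !(d == '}')) t).drop 1).length ≤ n := by
          have := (List.dropWhile_sublist (l := t) (p := fun d => !(d == '}'))).length_le
          simp only [List.length_drop]; omega
        rw [aLoop_eq_brace]
        rw [show ∀ w x y z, ([] : List Char) ++ w ++ x ++ y ++ z = (w ++ x ++ y ++ z) ++ []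
          by intros; simp]
        rw [aLoop_append _ _ (le_refl _), ih _ hr]
        rw [bLoop, if_pos rfl, List.nil_append, bLoop_one]
        simp
      by_cases h2 : c = '<'
      · subst h2
        have hr : ((List.dropWhile (fun d => !(d == '>')) t).drop 1).length ≤ n := by
          have := (List.dropWhile_sublist (l := t) (p := fun d => !(d == '>'))).length_le
          simp only [List.length_drop]; omega
        rw [aLoop_eq_angle]
        rw [show ∀ w x y z, ([] : List Char) ++ w ++ x ++ y ++ z = (w ++ x ++ y ++ z) ++ []
          by intros; simp]
        rw [aLoop_append _ _ (le_refl _), ih _ hr]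
        rw [bLoop, if_neg (by decide), if_pos rfl, List.nil_append, bLoop_one]
        simp
      by_cases h3 : c = '|'
      · subst h3
        rw [aLoop_eq_pipe]
        rw [show ([] : List Char) ++ pvPipe = pvPipe ++ [] by simp]
        rw [aLoop_append _ _ (le_refl _), ih _ ht]
        rw [bLoop, if_neg (by decide), if_neg (by decide), if_pos rfl, List.nil_append, bLoop_one]
        simp
      by_cases h4 : c = '~'
      · subst h4
        rw [aLoop_eq_tilde]
        rw [show ([] : List Char) ++ pvTilde = pvTilde ++ [] by simp]
        rw [aLoop_append _ _ (le_refl _), ih _ ht]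
        rw [bLoop, if_neg (by decide), if_neg (by decide), if_neg (by decide), if_pos rfl,
          List.nil_append, bLoop_one]
        simp
      · have hc : bSpecial c = false := by simp [bSpecial, h1, h2, h3, h4]
        rw [aLoop_eq_plain _ _ _ h1 h2 h3 h4]
        rw [show ([] : List Char) ++ [c] = [c] ++ [] by simp]
        rw [aLoop_append _ _ (le_refl _), ih _ ht, run_split t]
        rw [bLoop]
        simp only [h1, h2, h3, h4, if_false, List.nil_append]
        rw [bLoop_one]
        simp [hc]

-- ===== VERDICT (by name: the statement is the Claim_ definition above) =====
theorem surligner_texte_spec : Claim_equal_surligner_texte := by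
  intro content _
  unfold Spec_surligner_texte surligner_texte surligner_texte_alt
  rw [main_eq content.toList.length content.toList le_rfl]
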